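-- pv_equiv track=rewrite | github.com/lukacslacko/csaszar | find_low_pinch.py | _pinch_stats
-- ===== SOURCE A (Python) =====
-- def _pinch_stats(faces, N):
--     incident = {v: [] for v in range(N)}
--     for face in faces:
--         for v in face:
--             incident[v].append(face)
--     pinch_count = 0
--     total_excess_components = 0
--     for v in range(N):
--         link_edges, link_verts = [], set()
--         for face in incident[v]:
--             opp = [x for x in face if x != v]
--             link_edges.append(tuple(sorted(opp)))
--             link_verts.update(opp)
--         if not link_verts:
--             continue
--         # Check degrees
--         deg = {u: 0 for u in link_verts}
--         for a, b in link_edges: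
--             deg[a] += 1; deg[b] += 1
--         if any(d != 2 for d in deg.values()):
--             pinch_count += 1
--             total_excess_components += 5   # penalty
--             continue
--         # Components
--         adj = {u: [] for u in link_verts}
--         for a, b in link_edges:
--             adj[a].append(b); adj[b].append(a)
--         seen, comps = set(), 0
--         for start in link_verts:
--             if start in seen: continue
--             comps += 1
--             stk = [start]; seen.add(start)
--             while stk:
--                 u = stk.pop()
--                 for w in adj[u]:
--                     if w not in seen:
--                         seen.add(w); stk.append(w)
--         if comps > 1:
--             pinch_count += 1
--             total_excess_components += comps - 1
--     return pinch_count, total_excess_components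
-- ===== SOURCE B (Python) =====
-- def _pinch_stats(faces, N):
--     # Bucket the opposite pair of every face vertex into a fixed-size list
--     # indexed by vertex (no incident-faces dictionary, no per-vertex re-filtering),
--     # then count link components by union-find-style block merging instead of DFS.
--     links = [[] for _ in range(N)]
--     for a, b, c in faces:
--         links[a].append((b, c))
--         links[b].append((a, c))
--         links[c].append((a, b))
--     pinch_count = 0
--     total_excess_components = 0
--     for v in range(N):
--         pairs = links[v]
--         edges = [(x, y) if x < y else (y, x) for x, y in pairs]
--         verts = set()
--         for x, y in pairs:
--             verts.update((x, y))
--         if not verts: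
--             continue
--         deg = {}
--         for x, y in edges:
--             deg[x] = deg.get(x, 0) + 1
--             deg[y] = deg.get(y, 0) + 1
--         if any(deg.get(u, 0) != 2 for u in verts):
--             pinch_count += 1
--             total_excess_components += 5
--             continue
--         blocks = [[u] for u in verts]
--         for x, y in edges:
--             bx = next(blk for blk in blocks if x in blk)
--             by = next(blk for blk in blocks if y in blk)
--             if bx is not by:
--                 blocks.remove(bx)
--                 blocks.remove(by)
--                 blocks.append(bx + by)
--         comps = len(blocks)
--         if comps > 1:
--             pinch_count += 1
--             total_excess_components += comps - 1
--     return pinch_count, total_excess_components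
-- ===== Notes on version B (the rewrite author's own statement) =====
-- stated objective: alternative
-- what changed: B replaces the incident-faces dictionary and per-vertex filtering/sorting by a fixed-size vertex-indexed bucket list that receives each face vertex's opposite pair directly, grows the degree dictionary on demand instead of pre-initialising it over the link vertices, and counts link components by union-find-style merging of disjoint vertex blocks instead of A's adjacency-list DFS with an explicit stack.
-- outside the precondition, e.g. on _pinch_stats([(0, 0, 0)], 1): A returns (0, 0), B returns (1, 5)
import Mathlib
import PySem

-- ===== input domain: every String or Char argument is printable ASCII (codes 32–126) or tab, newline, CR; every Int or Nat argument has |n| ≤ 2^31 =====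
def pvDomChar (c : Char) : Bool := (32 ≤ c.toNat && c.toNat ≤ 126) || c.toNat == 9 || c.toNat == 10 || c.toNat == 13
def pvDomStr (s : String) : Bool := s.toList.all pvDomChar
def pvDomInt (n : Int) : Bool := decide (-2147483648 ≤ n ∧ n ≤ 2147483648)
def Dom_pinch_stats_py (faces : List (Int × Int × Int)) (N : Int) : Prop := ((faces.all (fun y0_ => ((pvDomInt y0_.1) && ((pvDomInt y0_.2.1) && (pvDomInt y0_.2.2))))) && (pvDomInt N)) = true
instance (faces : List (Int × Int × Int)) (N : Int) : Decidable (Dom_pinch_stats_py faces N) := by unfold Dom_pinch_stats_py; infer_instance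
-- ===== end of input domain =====

-- B scans the faces directly per vertex (no incident-faces dictionary), counts degrees in a
-- dictionary grown on demand, and counts link components by union-find-style merging of
-- disjoint vertex blocks instead of A's adjacency-list DFS (objective: alternative).

-- ===== PORT A =====
def pvFaceList (f : Int × Int × Int) : List Int := [f.1, f.2.1, f.2.2]

-- incident = {v: [] for v in range(N)}; for face in faces: for v in face: incident[v].append(face)
-- (Python raises KeyError for a vertex outside range(N); Dict.modify is a totality guard there)
def pvIncident (faces : List (Int × Int × Int)) (N : Int) :
    PySem.Dict Int (List (Int × Int × Int)) :=
  faces.foldl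
    (fun d f => (pvFaceList f).foldl (fun d v => d.modify v [] (· ++ [f])) d)
    (PySem.Dict.mk ((PySem.List.pyRange 0 N 1).map (fun v => (v, ([] : List (Int × Int × Int))))))

-- the per-v loop building link_edges (as the tuples-of-any-length Python builds) and link_verts
def pvLinkA (inc : List (Int × Int × Int)) (v : Int) : List (List Int) × PySem.Set Int :=
  inc.foldl
    (fun (p : List (List Int) × PySem.Set Int) f =>
      (p.1 ++ [PySem.List.sorted ((pvFaceList f).filter (fun x => !(x == v))) id],
       PySem.Set.update p.2 ((pvFaceList f).filter (fun x => !(x == v)))))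
    ([], PySem.Set.empty)

-- deg = {u: 0 for u in link_verts}; for a, b in link_edges: deg[a] += 1; deg[b] += 1
-- (Python raises ValueError unpacking a non-pair edge and KeyError on a missing key; guards below)
def pvDegA (verts : PySem.Set Int) (edges : List (List Int)) : PySem.Dict Int Int :=
  edges.foldl
    (fun d e =>
      match e with
      | [a, b] => (d.modify a 0 (· + 1)).modify b 0 (· + 1)
      | _ => d)
    (verts.foldl (fun d u => d.insert u (0 : Int)) PySem.Dict.empty)

-- adj = {u: [] for u in link_verts}; for a, b in link_edges: adj[a].append(b); adj[b].append(a)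
def pvAdjA (verts : PySem.Set Int) (edges : List (List Int)) : PySem.Dict Int (List Int) :=
  edges.foldl
    (fun d e =>
      match e with
      | [a, b] => (d.modify a [] (· ++ [b])).modify b [] (· ++ [a])
      | _ => d)
    (verts.foldl (fun d u => d.insert u ([] : List Int)) PySem.Dict.empty)

-- while stk: u = stk.pop(); for w in adj[u]: if w not in seen: seen.add(w); stk.append(w)
-- (fuel only makes the loop total; 2*|link_verts|+2 steps always suffice)
def pvDfsLoop (adj : PySem.Dict Int (List Int)) : Nat → List Int → PySem.Set Int → PySem.Set Int
  | 0, _, seen => seen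
  | fuel+1, stk, seen =>
    match PySem.List.pop? stk with
    | none => seen
    | some (u, stk') =>
      let p := (adj.getD u []).foldl
        (fun (q : List Int × PySem.Set Int) w =>
          if w ∈ q.2 then q else (q.1 ++ [w], PySem.Set.add q.2 w))
        (stk', seen)
      pvDfsLoop adj fuel p.1 p.2

-- seen, comps = set(), 0; for start in link_verts: if start in seen: continue; comps += 1; …DFS…
def pvCompsA (verts : PySem.Set Int) (edges : List (List Int)) : Int :=
  let adj := pvAdjA verts edges
  (verts.foldl
    (fun (p : PySem.Set Int × Int) start =>
      if start ∈ p.1 then p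
      else (pvDfsLoop adj (2 * verts.length + 2) [start] (PySem.Set.add p.1 start), p.2 + 1))
    (PySem.Set.empty, 0)).2

def pvBodyA (acc : Int × Int) (v : Int) (inc : List (Int × Int × Int)) : Int × Int :=
  let lnk := pvLinkA inc v
  if lnk.2 = [] then acc
  else if (pvDegA lnk.2 lnk.1).values.any (fun d => !(d == 2)) then (acc.1 + 1, acc.2 + 5)
  else
    let comps := pvCompsA lnk.2 lnk.1
    if comps > 1 then (acc.1 + 1, acc.2 + (comps - 1)) else acc

-- Python reads incident[v] for v in range(N); incident's keys are exactly range(N) in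
-- insertion order on every input Pre_ admits (the comprehension creates them and the face
-- loop only modifies existing keys), so walking the items visits the same (v, incident[v]) pairs.
def pinch_stats_py (faces : List (Int × Int × Int)) (N : Int) : Int × Int :=
  let incident := pvIncident faces N
  incident.items.foldl (fun (acc : Int × Int) vi => pvBodyA acc vi.1 vi.2) (0, 0)

-- ===== PORT B =====
-- links = [[] for _ in range(N)]; for a, b, c in faces: links[a].append((b, c)); …
-- links[i] with a possibly negative i follows Python's index rule via pySetD/pyGetD;
-- where Python raises IndexError the total forms leave the state unchanged (totality
-- guards, outside Pre_)
def pvLinkAppend (ls : List (List (Int × Int))) (i : Int) (e : Int × Int) :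
    List (List (Int × Int)) :=
  PySem.List.pySetD ls i (PySem.List.pyGetD ls i [] ++ [e])

def pvLinks (faces : List (Int × Int × Int)) (N : Int) : List (List (Int × Int)) :=
  faces.foldl
    (fun ls f =>
      pvLinkAppend (pvLinkAppend (pvLinkAppend ls f.1 (f.2.1, f.2.2)) f.2.1 (f.1, f.2.2))
        f.2.2 (f.1, f.2.1))
    ((PySem.List.pyRange 0 N 1).map (fun _ => ([] : List (Int × Int))))

-- deg = {}; for x, y in edges: deg[x] = deg.get(x, 0) + 1; deg[y] = deg.get(y, 0) + 1
def pvDegOf (edges : List (Int × Int)) : PySem.Dict Int Int :=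
  edges.foldl (fun d e => (d.modify e.1 0 (· + 1)).modify e.2 0 (· + 1)) PySem.Dict.empty

-- one merge of the two endpoint blocks ('is not' compares identity; the block lists are
-- pairwise distinct values in every reachable state, so value equality is exact here;
-- Python's next(…)/list.remove raise on a miss — the none fallbacks are totality guards,
-- unreachable since every endpoint lies in exactly one block)
def pvMergeStepB (blks : List (List Int)) (e : Int × Int) : List (List Int) :=
  match blks.find? (fun b => b.contains e.1), blks.find? (fun b => b.contains e.2) with
  | some bx, some bz =>
    if bx = bz then blks
    else
      match PySem.List.remove? blks bx with
      | none => blks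
      | some l1 =>
        match PySem.List.remove? l1 bz with
        | none => blks
        | some l2 => l2 ++ [bx ++ bz]
  | _, _ => blks

def pvBodyB (links : List (List (Int × Int))) (acc : Int × Int) (v : Int) : Int × Int :=
  let pairs := PySem.List.pyGetD links v []
  let edges := pairs.map (fun p => if p.1 < p.2 then (p.1, p.2) else (p.2, p.1))
  let verts := pairs.foldl (fun s p => PySem.Set.update s [p.1, p.2]) PySem.Set.empty
  if verts = [] then acc
  else
    let deg := pvDegOf edges
    if verts.any (fun u => !(deg.getD u 0 == 2)) then (acc.1 + 1, acc.2 + 5)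
    else
      let comps := PySem.List.len (edges.foldl pvMergeStepB (verts.map (fun u => [u])))
      if comps > 1 then (acc.1 + 1, acc.2 + (comps - 1)) else acc

def pinch_stats_py_alt (faces : List (Int × Int × Int)) (N : Int) : Int × Int :=
  let links := pvLinks faces N
  (PySem.List.pyRange 0 N 1).foldl (pvBodyB links) (0, 0)

-- ===== PRECONDITION & SPEC =====
-- Pre_ excludes faces with a repeated vertex or a vertex outside range(N): on almost all of
-- them A raises (KeyError / ValueError); on the fully degenerate faces (a,a,a) with a in
-- range A happens to return, silently ignoring the non-face, while B counts it as a pinch —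
-- a corner no caller of a triangulation checker specifies.
def Pre_pinch_stats_py (faces : List (Int × Int × Int)) (N : Int) : Prop :=
  ∀ f ∈ faces, f.1 ≠ f.2.1 ∧ f.1 ≠ f.2.2 ∧ f.2.1 ≠ f.2.2 ∧
    (0 ≤ f.1 ∧ f.1 < N) ∧ (0 ≤ f.2.1 ∧ f.2.1 < N) ∧ (0 ≤ f.2.2 ∧ f.2.2 < N)
instance (faces : List (Int × Int × Int)) (N : Int) : Decidable (Pre_pinch_stats_py faces N) := by
  unfold Pre_pinch_stats_py; infer_instance

def pvWitness_pinch_stats_py : (List (Int × Int × Int)) × Int :=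
  ([(0, 1, 2), (0, 1, 3), (0, 2, 3), (1, 2, 3)], 4)

def Spec_pinch_stats_py (faces : List (Int × Int × Int)) (N : Int) (out : Int × Int) : Prop :=
  out = pinch_stats_py_alt faces N
instance (faces : List (Int × Int × Int)) (N : Int) (out : Int × Int) :
    Decidable (Spec_pinch_stats_py faces N out) := by unfold Spec_pinch_stats_py; infer_instance

-- ===== CLAIM (what is proved, stated in full; the proofs are below) =====
def Claim_equal_pinch_stats_py : Prop :=
  ∀ (faces : List (Int × Int × Int)) (N : Int), Dom_pinch_stats_py faces N →
    Pre_pinch_stats_py faces N → Spec_pinch_stats_py faces N (pinch_stats_py faces N)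

-- ===== LEMMAS AND PROOFS =====

-- ---- contributions of one face to vertex v's link data ----
def pvSP (x y : Int) : Int × Int := if x < y then (x, y) else (y, x)
def pvContribP (v : Int) (f : Int × Int × Int) : List (Int × Int) :=
  (if v = f.1 then [(f.2.1, f.2.2)] else []) ++ (if v = f.2.1 then [(f.1, f.2.2)] else []) ++
    (if v = f.2.2 then [(f.1, f.2.1)] else [])
def pvContribI (v : Int) (f : Int × Int × Int) : List (Int × Int × Int) :=
  (if v = f.1 then [f] else []) ++ (if v = f.2.1 then [f] else []) ++ (if v = f.2.2 then [f] else [])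
def pvContribE (v : Int) (f : Int × Int × Int) : List (Int × Int) :=
  (if v = f.1 then [pvSP f.2.1 f.2.2] else []) ++ (if v = f.2.1 then [pvSP f.1 f.2.2] else []) ++
    (if v = f.2.2 then [pvSP f.1 f.2.1] else [])
def pvContribV (v : Int) (f : Int × Int × Int) : List Int :=
  (if v = f.1 then [f.2.1, f.2.2] else []) ++ (if v = f.2.1 then [f.1, f.2.2] else []) ++
    (if v = f.2.2 then [f.1, f.2.1] else [])

def pvDistinct (f : Int × Int × Int) : Prop := f.1 ≠ f.2.1 ∧ f.1 ≠ f.2.2 ∧ f.2.1 ≠ f.2.2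
def pvBnd (N : Int) (f : Int × Int × Int) : Prop :=
  (0 ≤ f.1 ∧ f.1 < N) ∧ (0 ≤ f.2.1 ∧ f.2.1 < N) ∧ (0 ≤ f.2.2 ∧ f.2.2 < N)

-- ---- generic dict-fold characterizations ----
theorem pvGetD_foldl_insert_const {ν : Type} (x0 : ν) (l : List Int) (d : PySem.Dict Int ν)
    (h : ∀ k, d.getD k x0 = x0) (v : Int) :
    (l.foldl (fun d u => d.insert u x0) d).getD v x0 = x0 := by
  induction l generalizing d with
  | nil => exact h v
  | cons u l ih =>
    simp only [List.foldl_cons]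
    exact ih _ (fun k => by rw [PySem.Dict.getD_insert]; split <;> simp [h])

theorem pvIncident_getD (faces : List (Int × Int × Int)) (d : PySem.Dict Int (List (Int × Int × Int)))
    (v : Int) :
    (faces.foldl (fun d f => (pvFaceList f).foldl (fun d u => d.modify u [] (· ++ [f])) d) d).getD v []
      = d.getD v [] ++ faces.flatMap (pvContribI v) := by
  induction faces generalizing d with
  | nil => simp
  | cons f faces ih =>
    simp only [List.foldl_cons, List.flatMap_cons, ih]
    have : ((pvFaceList f).foldl (fun d u => d.modify u [] (· ++ [f])) d).getD v []
        = d.getD v [] ++ pvContribI v f := by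
      simp only [pvFaceList, pvContribI, List.foldl_cons, List.foldl_nil, PySem.Dict.getD_modify]
      split_ifs <;> simp_all
    rw [this, List.append_assoc]

theorem pvAdj_getD (edges : List (Int × Int)) (d : PySem.Dict Int (List Int)) (u : Int) :
    (edges.foldl (fun d e => (d.modify e.1 [] (· ++ [e.2])).modify e.2 [] (· ++ [e.1])) d).getD u []
      = d.getD u [] ++ edges.flatMap (fun e => (if u = e.1 then [e.2] else []) ++ (if u = e.2 then [e.1] else [])) := by
  induction edges generalizing d with
  | nil => simp
  | cons e edges ih =>
    simp only [List.foldl_cons, List.flatMap_cons, ih, PySem.Dict.getD_modify]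
    split_ifs <;> simp_all

-- ---- per-face equalities (under distinctness) ----
theorem pvSorted_pair (x y : Int) (h : x ≠ y) :
    PySem.List.sorted [x, y] id = if x < y then [x, y] else [y, x] := by
  split_ifs with hlt
  · exact PySem.List.sorted_eq_of_perm_of_pairwise_lt _ _ _ (List.Perm.refl _) (by simp [hlt])
  · exact PySem.List.sorted_eq_of_perm_of_pairwise_lt _ _ _ (List.Perm.swap _ _ _) (by simp; omega)

theorem pvSP_list (x y : Int) (h : x ≠ y) :
    PySem.List.sorted [x, y] id = [(pvSP x y).1, (pvSP x y).2] := by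
  rw [pvSorted_pair x y h]; unfold pvSP; split_ifs <;> simp

theorem pvContrib_edges (v : Int) (f : Int × Int × Int) (h : pvDistinct f) :
    (pvContribI v f).map (fun f' => PySem.List.sorted ((pvFaceList f').filter (fun x => !(x == v))) id)
      = (pvContribE v f).map (fun e => [e.1, e.2]) := by
  obtain ⟨h1, h2, h3⟩ := h
  have h1' := Ne.symm h1; have h2' := Ne.symm h2; have h3' := Ne.symm h3
  by_cases e1 : v = f.1 <;> by_cases e2 : v = f.2.1 <;> by_cases e3 : v = f.2.2 <;>
    simp_all [pvContribI, pvContribE, pvFaceList] <;>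
    rw [pvSP_list _ _ (by omega)]

theorem pvContrib_verts (v : Int) (f : Int × Int × Int) (h : pvDistinct f) :
    (pvContribI v f).flatMap (fun f' => (pvFaceList f').filter (fun x => !(x == v)))
      = pvContribV v f := by
  obtain ⟨h1, h2, h3⟩ := h
  have h1' := Ne.symm h1; have h2' := Ne.symm h2; have h3' := Ne.symm h3
  by_cases e1 : v = f.1 <;> by_cases e2 : v = f.2.1 <;> by_cases e3 : v = f.2.2 <;>
    simp_all [pvContribI, pvContribV, pvFaceList]

theorem pvContrib_endpoints (v : Int) (f : Int × Int × Int) (h : pvDistinct f) (e : Int × Int)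
    (he : e ∈ pvContribE v f) : e.1 ∈ pvContribV v f ∧ e.2 ∈ pvContribV v f := by
  obtain ⟨h1, h2, h3⟩ := h
  by_cases e1 : v = f.1 <;> by_cases e2 : v = f.2.1 <;> by_cases e3 : v = f.2.2 <;>
    simp_all [pvContribE, pvContribV, pvSP] <;> subst he <;> split_ifs <;> simp

-- ---- link equality (A side) ----
theorem pvFoldl_update_flatMap {α : Type} (g : α → List Int) (l : List α) (s : PySem.Set Int) :
    l.foldl (fun s x => PySem.Set.update s (g x)) s = PySem.Set.update s (l.flatMap g) := by
  induction l generalizing s with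
  | nil => simp [PySem.Set.update]
  | cons x l ih => simp [ih, PySem.Set.update_append]

theorem pvLinkA_eq (inc : List (Int × Int × Int)) (v : Int) :
    pvLinkA inc v = (inc.map (fun f => PySem.List.sorted ((pvFaceList f).filter (fun x => !(x == v))) id),
      PySem.Set.update PySem.Set.empty (inc.flatMap (fun f => (pvFaceList f).filter (fun x => !(x == v))))) := by
  unfold pvLinkA
  rw [PySem.List.foldl_prod_mk
      (f := fun acc f => acc ++ [PySem.List.sorted ((pvFaceList f).filter (fun x => !(x == v))) id])
      (g := fun acc f => PySem.Set.update acc ((pvFaceList f).filter (fun x => !(x == v))))]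
  rw [PySem.List.foldl_append_singleton_eq_map, pvFoldl_update_flatMap]
  simp

-- ---- link equality (B side) ----
theorem pvGetSet (ls : List (List (Int × Int))) (a v : Int) (w : List (Int × Int))
    (ha0 : 0 ≤ a) (ha : a < (ls.length : Int)) (hv0 : 0 ≤ v) (hv : v < (ls.length : Int)) :
    PySem.List.pyGetD (PySem.List.pySetD ls a w) v []
      = if v = a then w else PySem.List.pyGetD ls v [] := by
  obtain ⟨n, rfl⟩ : ∃ n : Nat, a = (n : Int) := ⟨a.toNat, (Int.toNat_of_nonneg ha0).symm⟩
  obtain ⟨m, rfl⟩ : ∃ m : Nat, v = (m : Int) := ⟨v.toNat, (Int.toNat_of_nonneg hv0).symm⟩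
  have hn : n < ls.length := by exact_mod_cast ha
  rw [PySem.List.pyGetD_pySetD_natCast ls n m w [] hn]
  by_cases h : m = n <;> simp [h]

theorem pvLinkAppend_length (ls : List (List (Int × Int))) (i : Int) (e : Int × Int) :
    (pvLinkAppend ls i e).length = ls.length := by
  unfold pvLinkAppend
  exact PySem.List.length_pySetD ..

theorem pvLinkAppend_getD (ls : List (List (Int × Int))) (i : Int) (e : Int × Int) (v : Int)
    (hi0 : 0 ≤ i) (hi : i < (ls.length : Int)) (hv0 : 0 ≤ v) (hv : v < (ls.length : Int)) :
    PySem.List.pyGetD (pvLinkAppend ls i e) v []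
      = PySem.List.pyGetD ls v [] ++ (if v = i then [e] else []) := by
  unfold pvLinkAppend
  rw [pvGetSet ls i v _ hi0 hi hv0 hv]
  split_ifs with h
  · rw [h]
  · simp

theorem pvLinksStep_getD (ls : List (List (Int × Int))) (f : Int × Int × Int) (v : Int)
    (h1 : 0 ≤ f.1 ∧ f.1 < (ls.length : Int)) (h2 : 0 ≤ f.2.1 ∧ f.2.1 < (ls.length : Int))
    (h3 : 0 ≤ f.2.2 ∧ f.2.2 < (ls.length : Int)) (hv0 : 0 ≤ v) (hv : v < (ls.length : Int)) :
    PySem.List.pyGetD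
        (pvLinkAppend (pvLinkAppend (pvLinkAppend ls f.1 (f.2.1, f.2.2)) f.2.1 (f.1, f.2.2))
          f.2.2 (f.1, f.2.1)) v []
      = PySem.List.pyGetD ls v [] ++ pvContribP v f := by
  have l1 := pvLinkAppend_length ls f.1 (f.2.1, f.2.2)
  have l2 := pvLinkAppend_length (pvLinkAppend ls f.1 (f.2.1, f.2.2)) f.2.1 (f.1, f.2.2)
  rw [pvLinkAppend_getD _ _ _ _ h3.1 (by rw [l2, l1]; exact h3.2) hv0 (by rw [l2, l1]; exact hv),
    pvLinkAppend_getD _ _ _ _ h2.1 (by rw [l1]; exact h2.2) hv0 (by rw [l1]; exact hv),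
    pvLinkAppend_getD _ _ _ _ h1.1 h1.2 hv0 hv]
  unfold pvContribP
  simp [List.append_assoc]

theorem pvGetD_nil_map {α : Type} (l : List α) (v : Int) :
    PySem.List.pyGetD (l.map (fun _ => ([] : List (Int × Int)))) v [] = [] := by
  simp only [PySem.List.pyGetD, PySem.List.pyGet?, PySem.List.pyIdx?]
  split <;> split_ifs <;> simp [List.getElem?_replicate] <;> split_ifs <;> simp

theorem pvLinks_getD (faces : List (Int × Int × Int)) (N : Int)
    (hb : ∀ f ∈ faces, pvBnd N f) (v : Int) (hv0 : 0 ≤ v) (hvN : v < N) :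
    PySem.List.pyGetD (pvLinks faces N) v [] = faces.flatMap (pvContribP v) := by
  have hN : (((PySem.List.pyRange 0 N 1).map (fun _ => ([] : List (Int × Int)))).length : Int) = N := by
    rw [List.length_map, PySem.List.length_pyRange_one]
    omega
  have main : ∀ (fs : List (Int × Int × Int)), (∀ f ∈ fs, pvBnd N f) →
      ∀ ls : List (List (Int × Int)), (ls.length : Int) = N →
      PySem.List.pyGetD
          (fs.foldl (fun ls f =>
            pvLinkAppend (pvLinkAppend (pvLinkAppend ls f.1 (f.2.1, f.2.2)) f.2.1 (f.1, f.2.2))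
              f.2.2 (f.1, f.2.1)) ls) v []
        = PySem.List.pyGetD ls v [] ++ fs.flatMap (pvContribP v) := by
    intro fs
    induction fs with
    | nil => intro _ ls _; simp
    | cons f fs ih =>
      intro hbf ls hls
      simp only [List.foldl_cons, List.flatMap_cons]
      have hf := hbf f (by simp)
      have hlen : ((pvLinkAppend (pvLinkAppend (pvLinkAppend ls f.1 (f.2.1, f.2.2)) f.2.1
          (f.1, f.2.2)) f.2.2 (f.1, f.2.1)).length : Int) = N := by
        rw [pvLinkAppend_length, pvLinkAppend_length, pvLinkAppend_length, hls]
      rw [ih (fun f' hf' => hbf f' (by simp [hf'])) _ hlen,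
        pvLinksStep_getD ls f v (by rw [hls]; exact hf.1) (by rw [hls]; exact hf.2.1)
          (by rw [hls]; exact hf.2.2) hv0 (by rw [hls]; exact hvN)]
      rw [List.append_assoc]
  unfold pvLinks
  rw [main faces hb _ hN, pvGetD_nil_map]
  simp

-- ---- dict-keys helpers ----
theorem pvGetD_mk_const {ν : Type} (x0 : ν) (l : List Int) (v : Int) :
    (PySem.Dict.mk (l.map (fun u => (u, x0)))).getD v x0 = x0 := by
  induction l with
  | nil => rfl
  | cons u l ih =>
    rw [PySem.Dict.getD_eq_get?_getD]
    simp only [List.map_cons, PySem.Dict.get?_mk_cons]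
    split_ifs with h
    · rfl
    · rw [← PySem.Dict.getD_eq_get?_getD]
      exact ih

theorem pvKeys_modify3 {ν : Type} (d : PySem.Dict Int ν) (dflt : ν) (a b c : Int)
    (g1 g2 g3 : ν → ν) (ha : a ∈ d.keys) (hb : b ∈ d.keys) (hc : c ∈ d.keys) :
    (((d.modify a dflt g1).modify b dflt g2).modify c dflt g3).keys = d.keys := by
  have h1 : (d.modify a dflt g1).keys = d.keys := by
    rw [PySem.Dict.keys_modify,
      PySem.Dict.keys_insert_of_contains _ _ ((PySem.Dict.contains_iff_mem_keys d a).mpr ha)]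
  have h2 : ((d.modify a dflt g1).modify b dflt g2).keys = d.keys := by
    rw [PySem.Dict.keys_modify,
      PySem.Dict.keys_insert_of_contains _ _
        ((PySem.Dict.contains_iff_mem_keys _ b).mpr (h1 ▸ hb)), h1]
  rw [PySem.Dict.keys_modify,
    PySem.Dict.keys_insert_of_contains _ _
      ((PySem.Dict.contains_iff_mem_keys _ c).mpr (h2 ▸ hc)), h2]

theorem pvKeys_modify2 {ν : Type} (d : PySem.Dict Int ν) (dflt : ν) (a b : Int)
    (g1 g2 : ν → ν) (ha : a ∈ d.keys) (hb : b ∈ d.keys) :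
    ((d.modify a dflt g1).modify b dflt g2).keys = d.keys := by
  have h1 : (d.modify a dflt g1).keys = d.keys := by
    rw [PySem.Dict.keys_modify,
      PySem.Dict.keys_insert_of_contains _ _ ((PySem.Dict.contains_iff_mem_keys d a).mpr ha)]
  rw [PySem.Dict.keys_modify,
    PySem.Dict.keys_insert_of_contains _ _
      ((PySem.Dict.contains_iff_mem_keys _ b).mpr (h1 ▸ hb)), h1]

theorem pvKeys_foldl {α ν : Type} (faces : List α) (step : PySem.Dict Int ν → α → PySem.Dict Int ν)
    (K : List Int) :
    ∀ d : PySem.Dict Int ν, d.keys = K →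
      (∀ (d' : PySem.Dict Int ν) (f : α), f ∈ faces → d'.keys = K → (step d' f).keys = K) →
      (faces.foldl step d).keys = K := by
  induction faces with
  | nil => intro d hd _; exact hd
  | cons f faces ih =>
    intro d hd hstep
    rw [List.foldl_cons]
    exact ih (step d f) (hstep d f (by simp) hd)
      (fun d' f' hf' hk => hstep d' f' (by simp [hf']) hk)

theorem pvIncident_items (faces : List (Int × Int × Int)) (N : Int)
    (hb : ∀ f ∈ faces, pvBnd N f) :
    (pvIncident faces N).items
      = (PySem.List.pyRange 0 N 1).map (fun v => (v, faces.flatMap (pvContribI v))) := by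
  have hkeys : (pvIncident faces N).keys = PySem.List.pyRange 0 N 1 := by
    unfold pvIncident
    apply pvKeys_foldl
    · simp [PySem.Dict.keys, Function.comp_def]
    · intro d' f hf hk
      show (((d'.modify f.1 [] (· ++ [f])).modify f.2.1 [] (· ++ [f])).modify f.2.2 [] (· ++ [f])).keys
        = PySem.List.pyRange 0 N 1
      rw [pvKeys_modify3 d' [] f.1 f.2.1 f.2.2 _ _ _
        (by rw [hk, PySem.List.mem_pyRange_one]; exact (hb f hf).1)
        (by rw [hk, PySem.List.mem_pyRange_one]; exact (hb f hf).2.1)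
        (by rw [hk, PySem.List.mem_pyRange_one]; exact (hb f hf).2.2), hk]
  have hget : ∀ v, (pvIncident faces N).getD v [] = faces.flatMap (pvContribI v) := by
    intro v
    unfold pvIncident
    rw [pvIncident_getD, pvGetD_mk_const]
    simp
  rw [PySem.Dict.items_eq_map_keys _ (by rw [hkeys]; exact PySem.List.nodup_pyRange_one _ _) [],
    hkeys]
  exact List.map_congr_left (fun v _ => by rw [hget v])

-- ---- degree-check equality ----
theorem pvDegA_map (verts : PySem.Set Int) (edges : List (Int × Int)) :
    pvDegA verts (edges.map (fun e => [e.1, e.2]))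
      = edges.foldl (fun d e => (d.modify e.1 0 (· + 1)).modify e.2 0 (· + 1))
          (verts.foldl (fun d u => d.insert u (0 : Int)) PySem.Dict.empty) := by
  unfold pvDegA
  rw [List.foldl_map]

theorem pvDeg_getD_congr (edges : List (Int × Int)) :
    ∀ d1 d2 : PySem.Dict Int Int, (∀ u, d1.getD u 0 = d2.getD u 0) →
      ∀ u, (edges.foldl (fun d e => (d.modify e.1 0 (· + 1)).modify e.2 0 (· + 1)) d1).getD u 0
        = (edges.foldl (fun d e => (d.modify e.1 0 (· + 1)).modify e.2 0 (· + 1)) d2).getD u 0 := by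
  induction edges with
  | nil => intro d1 d2 h u; exact h u
  | cons e edges ih =>
    intro d1 d2 h u
    simp only [List.foldl_cons]
    apply ih
    intro k
    simp only [PySem.Dict.getD_modify]
    split_ifs <;> simp [h]

theorem pvDegCheck_eq (verts : PySem.Set Int) (edges : List (Int × Int))
    (hnd : verts.Nodup) (hE : ∀ e ∈ edges, e.1 ∈ verts ∧ e.2 ∈ verts) :
    (pvDegA verts (edges.map (fun e => [e.1, e.2]))).values.any (fun d => !(d == 2))
      = verts.any (fun u => !((pvDegOf edges).getD u 0 == 2)) := by
  rw [pvDegA_map]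
  have hkeys0 : (verts.foldl (fun d u => d.insert u (0 : Int)) PySem.Dict.empty).keys = verts := by
    rw [PySem.Dict.keys_foldl_insert (f := fun _ _ => (0 : Int))]
    have he : (PySem.Dict.empty : PySem.Dict Int Int).keys = [] := rfl
    rw [he, PySem.Set.update_nil_left, PySem.Set.ofList_eq_self_of_nodup verts hnd]
  have hkeys : (edges.foldl (fun d e => (d.modify e.1 0 (· + 1)).modify e.2 0 (· + 1))
      (verts.foldl (fun d u => d.insert u (0 : Int)) PySem.Dict.empty)).keys = verts := by
    apply pvKeys_foldl
    · exact hkeys0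
    · intro d' e he hk
      have h1 : e.1 ∈ d'.keys := by rw [hk]; exact (hE e he).1
      have h2 : e.2 ∈ d'.keys := by rw [hk]; exact (hE e he).2
      rw [pvKeys_modify2 d' 0 e.1 e.2 _ _ h1 h2, hk]
  have hget : ∀ u, (edges.foldl (fun d e => (d.modify e.1 0 (· + 1)).modify e.2 0 (· + 1))
      (verts.foldl (fun d u => d.insert u (0 : Int)) PySem.Dict.empty)).getD u 0
        = (pvDegOf edges).getD u 0 := by
    intro u
    unfold pvDegOf
    apply pvDeg_getD_congr
    intro k
    rw [pvGetD_foldl_insert_const _ _ _ (fun k' => by simp)]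
    simp
  rw [PySem.Dict.values_eq_map_keys _ (by rw [hkeys]; exact hnd) 0, hkeys, List.any_map]
  congr 1
  funext u
  simp [Function.comp, hget u]

-- ---- partition theory ----
def pvWFB (blks : List (List Int)) : Prop :=
  blks.flatten.Nodup ∧ (∀ b ∈ blks, b ≠ []) ∧ blks.Nodup
def pvSameB (blks : List (List Int)) (x y : Int) : Prop := ∃ b ∈ blks, x ∈ b ∧ y ∈ b
def pvMinP (blks : List (List Int)) (es : List (Int × Int)) : Prop :=
  ∀ S : Int → Prop, (∀ e ∈ es, (S e.1 ↔ S e.2)) → ∀ b ∈ blks, ∀ x ∈ b, S x → ∀ y ∈ b, S y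

-- the abstract (filter-form) merge step the proofs reason about
def pvMergeStep (blks : List (List Int)) (e : Int × Int) : List (List Int) :=
  match blks.find? (fun b => b.contains e.1), blks.find? (fun b => b.contains e.2) with
  | some bx, some bz =>
    if bx = bz then blks
    else blks.filter (fun b => !(b == bx || b == bz)) ++ [bx ++ bz]
  | _, _ => blks

theorem pvBlock_unique (blks : List (List Int)) (h : pvWFB blks) {b b' : List Int} {u : Int}
    (hb : b ∈ blks) (hb' : b' ∈ blks) (hu : u ∈ b) (hu' : u ∈ b') : b = b' := by
  by_contra hne
  have hdisj := (List.nodup_flatten.mp h.1).2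
  exact (hdisj.forall (fun _ _ h => h.symm) hb hb' hne) hu hu'

theorem pvFind_block (blks : List (List Int)) (u : Int) (hu : u ∈ blks.flatten) :
    ∃ b, blks.find? (fun b => b.contains u) = some b ∧ u ∈ b ∧ b ∈ blks := by
  obtain ⟨b0, hb0, hu0⟩ := List.mem_flatten.mp hu
  have : (blks.find? (fun b => b.contains u)).isSome := by
    rw [List.find?_isSome]; exact ⟨b0, hb0, by simpa using hu0⟩
  obtain ⟨b, hb⟩ := Option.isSome_iff_exists.mp this
  exact ⟨b, hb, by simpa using List.find?_some hb, List.mem_of_find?_eq_some hb⟩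

theorem pvFilter_erase2 (blks : List (List Int)) (bx bz : List Int) (hnd : blks.Nodup) :
    blks.filter (fun b => !(b == bx || b == bz)) = (blks.erase bx).erase bz := by
  rw [List.Nodup.erase_eq_filter hnd, List.Nodup.erase_eq_filter (hnd.filter _),
    List.filter_filter]
  exact List.filter_congr (fun b _ => by
    simp [Bool.not_or, bne, Bool.and_comm])

theorem pvMergeStepB_eq (blks : List (List Int)) (e : Int × Int) (h : pvWFB blks) :
    pvMergeStepB blks e = pvMergeStep blks e := by
  unfold pvMergeStepB pvMergeStep
  cases hfx : blks.find? (fun b => b.contains e.1) with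
  | none => rfl
  | some bx =>
    cases hfz : blks.find? (fun b => b.contains e.2) with
    | none => rfl
    | some bz =>
      dsimp only
      split_ifs with hbe
      · rfl
      have hbx := List.mem_of_find?_eq_some hfx
      have hbz := List.mem_of_find?_eq_some hfz
      have hbz' : bz ∈ blks.erase bx :=
        (List.Nodup.mem_erase_iff h.2.2).mpr ⟨fun hzx => hbe hzx.symm, hbz⟩
      rw [PySem.List.remove?_eq_some_erase blks bx hbx]
      dsimp only
      rw [PySem.List.remove?_eq_some_erase (blks.erase bx) bz hbz']
      dsimp only
      rw [pvFilter_erase2 blks bx bz h.2.2]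

theorem pvMerge_flatten_mem (blks : List (List Int)) (e : Int × Int) (u : Int) :
    u ∈ (pvMergeStep blks e).flatten ↔ u ∈ blks.flatten := by
  unfold pvMergeStep
  cases hfx : blks.find? (fun b => b.contains e.1) with
  | none => simp
  | some bx =>
    cases hfz : blks.find? (fun b => b.contains e.2) with
    | none => simp
    | some bz =>
      dsimp only
      split_ifs with hbe
      · rfl
      have hbx := List.mem_of_find?_eq_some hfx
      have hbz := List.mem_of_find?_eq_some hfz
      simp only [List.flatten_append, List.flatten_cons, List.flatten_nil, List.append_nil,
        List.mem_append, List.mem_flatten, List.mem_filter]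
      constructor
      · rintro (⟨b, ⟨hb, _⟩, hub⟩ | hu | hu)
        · exact ⟨b, hb, hub⟩
        · exact ⟨bx, hbx, hu⟩
        · exact ⟨bz, hbz, hu⟩
      · rintro ⟨b, hb, hub⟩
        by_cases h1 : b = bx
        · exact Or.inr (Or.inl (h1 ▸ hub))
        by_cases h2 : b = bz
        · exact Or.inr (Or.inr (h2 ▸ hub))
        · exact Or.inl ⟨b, ⟨hb, by simp [h1, h2]⟩, hub⟩

theorem pvMerge_WF (blks : List (List Int)) (e : Int × Int) (h : pvWFB blks) :
    pvWFB (pvMergeStep blks e) := by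
  obtain ⟨hfl, hne, hndb⟩ := h
  unfold pvMergeStep
  cases hfx : blks.find? (fun b => b.contains e.1) with
  | none => exact ⟨hfl, hne, hndb⟩
  | some bx =>
    cases hfz : blks.find? (fun b => b.contains e.2) with
    | none => exact ⟨hfl, hne, hndb⟩
    | some bz =>
      dsimp only
      split_ifs with hbe
      · exact ⟨hfl, hne, hndb⟩
      have hbx := List.mem_of_find?_eq_some hfx
      have hbz := List.mem_of_find?_eq_some hfz
      have herase : blks.filter (fun b => !(b == bx || b == bz)) = (blks.erase bx).erase bz :=
        pvFilter_erase2 blks bx bz hndb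
      have hbz' : bz ∈ blks.erase bx :=
        (List.Nodup.mem_erase_iff hndb).mpr ⟨Ne.symm hbe, hbz⟩
      have hperm : blks.Perm (bx :: bz :: (blks.erase bx).erase bz) :=
        (List.perm_cons_erase hbx).trans (List.Perm.cons bx (List.perm_cons_erase hbz'))
      have hpermfl : blks.flatten.Perm ((blks.filter (fun b => !(b == bx || b == bz))).flatten ++ (bx ++ bz)) := by
        refine (hperm.flatten).trans ?_
        rw [herase]
        simp only [List.flatten_cons]
        rw [← List.append_assoc]
        exact List.perm_append_comm
      refine ⟨?_, ?_, ?_⟩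
      · rw [List.flatten_append]
        have h2 := hpermfl.nodup_iff.mp hfl
        simp only [List.flatten_cons, List.flatten_nil, List.append_nil]
        exact h2
      · intro b hb
        rcases List.mem_append.mp hb with h | h
        · exact hne b (List.mem_filter.mp h).1
        · simp only [List.mem_singleton] at h
          subst h
          intro hx
          rw [List.append_eq_nil_iff] at hx
          exact (hne bx hbx) hx.1
      · rw [List.nodup_append]
        refine ⟨hndb.filter _, by simp, ?_⟩
        intro b hb b' hb'
        obtain rfl : b' = bx ++ bz := by simpa using hb'
        obtain ⟨hbmem, hpred⟩ := List.mem_filter.mp hb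
        obtain ⟨u, hu⟩ := List.exists_mem_of_ne_nil bx (hne bx hbx)
        intro heq
        have hbbx : b = bx :=
          pvBlock_unique blks ⟨hfl, hne, hndb⟩ hbmem hbx (heq ▸ (List.mem_append.mpr (Or.inl hu))) hu
        have : bz = [] := by
          have hlen := congrArg List.length (hbbx ▸ heq)
          simpa using hlen
        exact hne bz hbz this

theorem pvFoldMergeB_eq (edges : List (Int × Int)) :
    ∀ blks : List (List Int), pvWFB blks →
      edges.foldl pvMergeStepB blks = edges.foldl pvMergeStep blks := by
  induction edges with
  | nil => intro blks _; rfl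
  | cons e edges ih =>
    intro blks h
    simp only [List.foldl_cons]
    rw [pvMergeStepB_eq blks e h]
    exact ih _ (pvMerge_WF blks e h)

theorem pvWF_init (verts : List Int) (hnd : verts.Nodup) : pvWFB (verts.map (fun u => [u])) := by
  have hflat0 : (verts.map (fun u => [u])).flatten = verts := by
    induction verts with
    | nil => rfl
    | cons v vs ihv => simp_all [List.nodup_cons]
  refine ⟨by rw [hflat0]; exact hnd, by simp, ?_⟩
  exact List.Nodup.map (fun a b h => by simpa using h) hnd

theorem pvMerge_same_mono (blks : List (List Int)) (e : Int × Int) (x y : Int)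
    (h : pvSameB blks x y) : pvSameB (pvMergeStep blks e) x y := by
  obtain ⟨b, hb, hx, hy⟩ := h
  unfold pvMergeStep
  cases hfx : blks.find? (fun b => b.contains e.1) with
  | none => exact ⟨b, hb, hx, hy⟩
  | some bx =>
    cases hfz : blks.find? (fun b => b.contains e.2) with
    | none => exact ⟨b, hb, hx, hy⟩
    | some bz =>
      dsimp only
      split_ifs with hbe
      · exact ⟨b, hb, hx, hy⟩
      by_cases h1 : b = bx
      · exact ⟨bx ++ bz, by simp, by simp [← h1, hx], by simp [← h1, hy]⟩
      by_cases h2 : b = bz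
      · exact ⟨bx ++ bz, by simp, by simp [← h2, hx], by simp [← h2, hy]⟩
      · exact ⟨b, List.mem_append.mpr (Or.inl (List.mem_filter.mpr ⟨hb, by simp [h1, h2]⟩)), hx, hy⟩

theorem pvMerge_closes (blks : List (List Int)) (e : Int × Int)
    (hx : e.1 ∈ blks.flatten) (hy : e.2 ∈ blks.flatten) :
    pvSameB (pvMergeStep blks e) e.1 e.2 := by
  obtain ⟨bx, hfx, hx1, hx2⟩ := pvFind_block blks e.1 hx
  obtain ⟨bz, hfz, hz1, hz2⟩ := pvFind_block blks e.2 hy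
  unfold pvMergeStep
  rw [hfx, hfz]
  dsimp only
  split_ifs with hbe
  · exact ⟨bx, hx2, hx1, hbe ▸ hz1⟩
  · exact ⟨bx ++ bz, by simp, by simp [hx1], by simp [hz1]⟩

theorem pvMerge_min (blks : List (List Int)) (e : Int × Int) (es : List (Int × Int))
    (h : pvMinP blks es) : pvMinP (pvMergeStep blks e) (es ++ [e]) := by
  intro S hS
  have hS' : ∀ e' ∈ es, (S e'.1 ↔ S e'.2) := fun e' he' => hS e' (List.mem_append.mpr (Or.inl he'))
  have hSe : S e.1 ↔ S e.2 := hS e (by simp)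
  unfold pvMergeStep
  cases hfx : blks.find? (fun b => b.contains e.1) with
  | none => exact h S hS'
  | some bx =>
    cases hfz : blks.find? (fun b => b.contains e.2) with
    | none => exact h S hS'
    | some bz =>
      dsimp only
      split_ifs with hbe
      · exact h S hS'
      have hbx := List.mem_of_find?_eq_some hfx
      have hbz := List.mem_of_find?_eq_some hfz
      have hx1 : e.1 ∈ bx := by simpa using List.find?_some hfx
      have hz1 : e.2 ∈ bz := by simpa using List.find?_some hfz
      intro b hb x hx hSx y hy
      rcases List.mem_append.mp hb with hbf | hbs
      · exact h S hS' b (List.mem_filter.mp hbf).1 x hx hSx y hy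
      · obtain rfl : b = bx ++ bz := by simpa using hbs
        have key : ∀ z ∈ bx ++ bz, S z := by
          rcases List.mem_append.mp hx with hxx | hxz
          · have hbxall := h S hS' bx hbx x hxx hSx
            have hbzall := h S hS' bz hbz e.2 hz1 (hSe.mp (hbxall e.1 hx1))
            intro z hz
            rcases List.mem_append.mp hz with h' | h'
            · exact hbxall z h'
            · exact hbzall z h'
          · have hbzall := h S hS' bz hbz x hxz hSx
            have hbxall := h S hS' bx hbx e.1 hx1 (hSe.mpr (hbzall e.2 hz1))
            intro z hz
            rcases List.mem_append.mp hz with h' | h'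
            · exact hbxall z h'
            · exact hbzall z h'
        exact key y hy

theorem pvFold_facts (edges : List (Int × Int)) :
    ∀ (blks : List (List Int)) (es0 : List (Int × Int)), pvWFB blks →
      pvMinP blks es0 → (∀ e ∈ es0, pvSameB blks e.1 e.2) →
      (∀ e ∈ edges, e.1 ∈ blks.flatten ∧ e.2 ∈ blks.flatten) →
      pvWFB (edges.foldl pvMergeStep blks) ∧
      pvMinP (edges.foldl pvMergeStep blks) (es0 ++ edges) ∧
      (∀ e ∈ es0 ++ edges, pvSameB (edges.foldl pvMergeStep blks) e.1 e.2) ∧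
      (∀ u, u ∈ (edges.foldl pvMergeStep blks).flatten ↔ u ∈ blks.flatten) := by
  induction edges with
  | nil =>
    intro blks es0 hwf hmin hclos _
    simp only [List.foldl_nil, List.append_nil]
    exact ⟨hwf, hmin, hclos, by simp⟩
  | cons e0 rest ih =>
    intro blks es0 hwf hmin hclos hE
    have hwf' := pvMerge_WF blks e0 hwf
    have hmin' := pvMerge_min blks e0 es0 hmin
    have hclos' : ∀ ee ∈ es0 ++ [e0], pvSameB (pvMergeStep blks e0) ee.1 ee.2 := by
      intro ee hee
      rcases List.mem_append.mp hee with h' | h'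
      · exact pvMerge_same_mono blks e0 _ _ (hclos ee h')
      · obtain rfl : ee = e0 := by simpa using h'
        exact pvMerge_closes blks ee (hE ee (by simp)).1 (hE ee (by simp)).2
    have hE' : ∀ ee ∈ rest, ee.1 ∈ (pvMergeStep blks e0).flatten ∧ ee.2 ∈ (pvMergeStep blks e0).flatten := by
      intro ee hee
      exact ⟨(pvMerge_flatten_mem blks e0 _).mpr (hE ee (by simp [hee])).1,
             (pvMerge_flatten_mem blks e0 _).mpr (hE ee (by simp [hee])).2⟩
    obtain ⟨w1, w2, w3, w4⟩ := ih (pvMergeStep blks e0) (es0 ++ [e0]) hwf' hmin' hclos' hE'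
    refine ⟨by simpa using w1, ?_, ?_, ?_⟩
    · rw [List.foldl_cons]
      have : es0 ++ e0 :: rest = (es0 ++ [e0]) ++ rest := by simp
      rw [this]
      exact w2
    · intro ee hee
      rw [List.foldl_cons]
      apply w3
      have : es0 ++ e0 :: rest = (es0 ++ [e0]) ++ rest := by simp
      rw [← this]
      exact hee
    · intro u
      rw [List.foldl_cons]
      exact (w4 u).trans (pvMerge_flatten_mem blks e0 u)

-- ---- DFS analysis ----
theorem pvInner_spec (l : List Int) :
    ∀ (stk : List Int) (seen : PySem.Set Int),
      ∃ new : List Int,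
        l.foldl (fun (q : List Int × PySem.Set Int) w =>
            if w ∈ q.2 then q else (q.1 ++ [w], PySem.Set.add q.2 w)) (stk, seen)
          = (stk ++ new, seen ++ new) ∧
        new.Nodup ∧ (∀ x ∈ new, x ∈ l ∧ x ∉ seen) ∧ (∀ x ∈ l, x ∈ seen ++ new) := by
  induction l with
  | nil => intro stk seen; exact ⟨[], by simp⟩
  | cons w l ih =>
    intro stk seen
    simp only [List.foldl_cons]
    by_cases hw : w ∈ seen
    · simp only [if_pos hw]
      obtain ⟨new, heq, hnd, hmem, hall⟩ := ih stk seen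
      refine ⟨new, heq, hnd, fun x hx => ⟨List.mem_cons_of_mem _ (hmem x hx).1, (hmem x hx).2⟩, ?_⟩
      intro x hx
      rcases List.mem_cons.mp hx with rfl | hx'
      · exact List.mem_append.mpr (Or.inl hw)
      · exact hall x hx'
    · simp only [if_neg hw, PySem.Set.add_of_not_mem hw]
      obtain ⟨new, heq, hnd, hmem, hall⟩ := ih (stk ++ [w]) (seen ++ [w])
      refine ⟨w :: new, ?_, ?_, ?_, ?_⟩
      · rw [heq]; simp
      · refine List.nodup_cons.mpr ⟨?_, hnd⟩
        intro hwn
        have := (hmem w hwn).2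
        simp at this
      · intro x hx
        rcases List.mem_cons.mp hx with rfl | hx'
        · exact ⟨List.mem_cons_self, hw⟩
        · have h1 := hmem x hx'
          refine ⟨List.mem_cons_of_mem _ h1.1, fun hxs => h1.2 (by simp [hxs])⟩
      · intro x hx
        rcases List.mem_cons.mp hx with rfl | hx'
        · simp
        · have := hall x hx'
          simp only [List.mem_append, List.mem_cons] at this ⊢
          tauto

theorem pvFilter_measure (verts new seen : List Int) (hv : verts.Nodup)
    (hsub : ∀ x ∈ new, x ∈ verts) (hdis : ∀ x ∈ new, x ∉ seen) (hnd : new.Nodup) :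
    (verts.filter (fun x => !((seen ++ new).contains x))).length + new.length
      = (verts.filter (fun x => !(seen.contains x))).length := by
  have h1 : verts.filter (fun x => !((seen ++ new).contains x))
      = (verts.filter (fun x => !(seen.contains x))).filter (fun x => !(new.contains x)) := by
    rw [List.filter_filter]
    exact List.filter_congr (fun x _ => by
      by_cases h1 : x ∈ seen <;> by_cases h2 : x ∈ new <;> simp [h1, h2])
  set A := verts.filter (fun x => !(seen.contains x)) with hA
  have hAnd : A.Nodup := hv.filter _
  have hnsub : ∀ x ∈ new, x ∈ A := fun x hx => by
    rw [hA, List.mem_filter]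
    exact ⟨hsub x hx, by simpa using hdis x hx⟩
  have hperm : (A.filter (fun x => new.contains x)).Perm new := by
    apply (List.perm_ext_iff_of_nodup (hAnd.filter _) hnd).mpr
    intro x
    simp only [List.mem_filter]
    constructor
    · rintro ⟨_, h⟩; simpa using h
    · intro hx; exact ⟨hnsub x hx, by simpa using hx⟩
  rw [h1]
  have htot := List.length_eq_length_filter_add (l := A) (fun x => new.contains x)
  have hlen := hperm.length_eq
  omega

theorem pvDfsLoop_succ (adj : PySem.Dict Int (List Int)) (fuel : Nat) (stk : List Int) (seen : PySem.Set Int) :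
    pvDfsLoop adj (fuel+1) stk seen
      = match PySem.List.pop? stk with
        | none => seen
        | some (u, stk') =>
          pvDfsLoop adj fuel
            ((adj.getD u []).foldl (fun (q : List Int × PySem.Set Int) w =>
              if w ∈ q.2 then q else (q.1 ++ [w], PySem.Set.add q.2 w)) (stk', seen)).1
            ((adj.getD u []).foldl (fun (q : List Int × PySem.Set Int) w =>
              if w ∈ q.2 then q else (q.1 ++ [w], PySem.Set.add q.2 w)) (stk', seen)).2 := rfl

theorem pvDfs_spec (adj : PySem.Dict Int (List Int)) (verts : List Int) (S : Int → Prop)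
    (hvnd : verts.Nodup)
    (HnbV : ∀ u w, w ∈ adj.getD u [] → w ∈ verts)
    (HS : ∀ u w, S u → w ∈ adj.getD u [] → S w) :
    ∀ (fuel : Nat) (stk : List Int) (seen : PySem.Set Int),
      stk.Nodup → (∀ u ∈ stk, u ∈ seen) →
      (∀ u ∈ seen, u ∉ stk → ∀ w ∈ adj.getD u [], w ∈ seen) →
      (∀ u ∈ seen, S u) →
      2 * (verts.filter (fun x => !(seen.contains x))).length + stk.length < fuel →
      (∀ u ∈ seen, u ∈ pvDfsLoop adj fuel stk seen) ∧
      (∀ u ∈ pvDfsLoop adj fuel stk seen, S u) ∧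
      (∀ u ∈ pvDfsLoop adj fuel stk seen, ∀ w ∈ adj.getD u [], w ∈ pvDfsLoop adj fuel stk seen) := by
  intro fuel
  induction fuel with
  | zero => intro stk seen _ _ _ _ hf; omega
  | succ fuel ih =>
    intro stk seen hstknd hstkseen hclosed hSseen hfuel
    rcases List.eq_nil_or_concat stk with rfl | ⟨ys, u, rfl⟩
    · -- empty stack: the loop returns seen
      have hred : pvDfsLoop adj (fuel+1) [] seen = seen := rfl
      rw [hred]
      exact ⟨fun u hu => hu, hSseen, fun u hu => hclosed u hu (by simp)⟩
    · simp only [List.concat_eq_append] at hstknd hstkseen hclosed hfuel ⊢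
      have hpop : PySem.List.pop? (ys ++ [u]) = some (u, ys) := PySem.List.pop?_last ys u
      rw [pvDfsLoop_succ, hpop]
      obtain ⟨new, heq, hnewnd, hnewmem, hall⟩ := pvInner_spec (adj.getD u []) ys seen
      dsimp only
      rw [heq]
      have huseen : u ∈ seen := hstkseen u (by simp)
      have hySeen : ∀ x ∈ ys, x ∈ seen := fun x hx => hstkseen x (by simp [hx])
      have hndys : ys.Nodup := (List.nodup_append.mp hstknd).1
      have hunotys : u ∉ ys := by
        have := List.nodup_append.mp hstknd
        intro hu
        exact this.2.2 u hu u (by simp) rfl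
      have hnewverts : ∀ x ∈ new, x ∈ verts := fun x hx => HnbV u x (hnewmem x hx).1
      have hnewnseen : ∀ x ∈ new, x ∉ seen := fun x hx => (hnewmem x hx).2
      have h1 : (ys ++ new).Nodup := by
        rw [List.nodup_append]
        exact ⟨hndys, hnewnd, fun a ha b hb => fun hab => (hnewnseen b hb) (hab ▸ hySeen a ha)⟩
      have h2 : ∀ x ∈ ys ++ new, x ∈ seen ++ new := by
        intro x hx
        rcases List.mem_append.mp hx with h | h
        · exact List.mem_append.mpr (Or.inl (hySeen x h))
        · exact List.mem_append.mpr (Or.inr h)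
      have h3 : ∀ x ∈ seen ++ new, x ∉ ys ++ new → ∀ w ∈ adj.getD x [], w ∈ seen ++ new := by
        intro x hx hxn w hw
        rcases List.mem_append.mp hx with h | h
        · by_cases hxu : x = u
          · exact hall w (hxu ▸ hw)
          · have hxny : x ∉ ys ++ [u] := by
              intro hmem
              rcases List.mem_append.mp hmem with h' | h'
              · exact hxn (List.mem_append.mpr (Or.inl h'))
              · simp at h'; exact hxu h'
            exact List.mem_append.mpr (Or.inl (hclosed x h hxny w hw))
        · exact absurd (List.mem_append.mpr (Or.inr h)) hxn
      have h4 : ∀ x ∈ seen ++ new, S x := by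
        intro x hx
        rcases List.mem_append.mp hx with h | h
        · exact hSseen x h
        · exact HS u x (hSseen u huseen) (hnewmem x h).1
      have hmeas := pvFilter_measure verts new seen hvnd hnewverts hnewnseen hnewnd
      have h5 : 2 * (verts.filter (fun x => !((seen ++ new).contains x))).length + (ys ++ new).length < fuel := by
        have hys : (ys ++ [u]).length = ys.length + 1 := by simp
        have hlen2 : (ys ++ new).length = ys.length + new.length := by simp
        have hbc : (List.filter (fun x => !seen.contains x) verts).length
            = (List.filter (fun x => !List.contains seen x) verts).length := rfl
        have hm2 : (verts.filter (fun x => !((seen ++ new).contains x))).length + new.length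
            = (verts.filter (fun x => !(seen.contains x))).length := hmeas
        omega
      obtain ⟨w1, w2, w3⟩ := ih (ys ++ new) (seen ++ new) h1 h2 h3 h4 h5
      refine ⟨fun x hx => w1 x (List.mem_append.mpr (Or.inl hx)), w2, w3⟩

theorem pvFilter_or_length (l : List (List Int)) (q : List Int → Bool) (b0 : List Int)
    (hnd : l.Nodup) (hb0 : b0 ∈ l) (hq : q b0 = false) :
    (l.filter (fun b => q b || b == b0)).length = (l.filter q).length + 1 := by
  induction l with
  | nil => simp at hb0
  | cons hd t ih =>
    rcases List.mem_cons.mp hb0 with rfl | hb0'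
    · have hnotin : b0 ∉ t := (List.nodup_cons.mp hnd).1
      have ht : t.filter (fun b => q b || b == b0) = t.filter q := by
        apply List.filter_congr
        intro b hb
        have : b ≠ b0 := fun he => hnotin (he ▸ hb)
        simp [this]
      simp [hq, ht]
    · have hne : hd ≠ b0 := fun he => (List.nodup_cons.mp hnd).1 (he ▸ hb0')
      have ih' := ih (List.nodup_cons.mp hnd).2 hb0'
      by_cases hqh : q hd = true
      · simp [hqh, ih']
      · simp only [Bool.not_eq_true] at hqh
        simp [hqh, hne, ih']

-- the central lemma: DFS component count = number of merged blocks
theorem pvComps_eq (verts : PySem.Set Int) (edges : List (Int × Int)) (hnd : verts.Nodup)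
    (hE : ∀ e ∈ edges, e.1 ∈ verts ∧ e.2 ∈ verts) :
    pvCompsA verts (edges.map (fun e => [e.1, e.2]))
      = PySem.List.len (edges.foldl pvMergeStepB (verts.map (fun u => [u]))) := by
  have hflat0 : (verts.map (fun u => [u])).flatten = verts := by
    clear hnd hE
    induction verts with
    | nil => rfl
    | cons v vs ihv => simp_all
  have hadj : pvAdjA verts (edges.map (fun e => [e.1, e.2]))
      = edges.foldl (fun d e => (d.modify e.1 [] (· ++ [e.2])).modify e.2 [] (· ++ [e.1]))
          (verts.foldl (fun d u => d.insert u ([] : List Int)) PySem.Dict.empty) := by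
    unfold pvAdjA; rw [List.foldl_map]
  have hnbrs : ∀ u, (pvAdjA verts (edges.map (fun e => [e.1, e.2]))).getD u []
      = edges.flatMap (fun e => (if u = e.1 then [e.2] else []) ++ (if u = e.2 then [e.1] else [])) := by
    intro u
    rw [hadj, pvAdj_getD, pvGetD_foldl_insert_const _ _ _ (fun k => by simp)]
    simp
  clear hadj
  set adj := pvAdjA verts (edges.map (fun e => [e.1, e.2])) with hadjdef
  have hnb_mem : ∀ u w, w ∈ adj.getD u [] ↔ ∃ e ∈ edges, (u = e.1 ∧ w = e.2) ∨ (u = e.2 ∧ w = e.1) := by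
    intro u w
    rw [hnbrs, List.mem_flatMap]
    constructor
    · rintro ⟨e, he, hw⟩
      rcases List.mem_append.mp hw with h | h
      · refine ⟨e, he, Or.inl ?_⟩
        by_cases h1 : u = e.1 <;> simp [h1] at h ⊢; exact h
      · refine ⟨e, he, Or.inr ?_⟩
        by_cases h1 : u = e.2 <;> simp [h1] at h ⊢; exact h
    · rintro ⟨e, he, ⟨h1, h2⟩ | ⟨h1, h2⟩⟩
      · exact ⟨e, he, List.mem_append.mpr (Or.inl (by simp [h1, h2]))⟩
      · exact ⟨e, he, List.mem_append.mpr (Or.inr (by simp [h1, h2]))⟩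
  have hwf0 : pvWFB (verts.map (fun u => [u])) := pvWF_init verts hnd
  rw [pvFoldMergeB_eq edges _ hwf0]
  set PF := edges.foldl pvMergeStep (verts.map (fun u => [u])) with hPF
  have hmin0 : pvMinP (verts.map (fun u => [u])) [] := by
    intro S _ b hb x hx hSx y hy
    obtain ⟨u, _, rfl⟩ := List.mem_map.mp hb
    simp only [List.mem_singleton] at hx hy
    rw [hy, ← hx]; exact hSx
  have hE0 : ∀ e ∈ edges, e.1 ∈ (verts.map (fun u => [u])).flatten ∧ e.2 ∈ (verts.map (fun u => [u])).flatten := by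
    intro e he; rw [hflat0]; exact hE e he
  obtain ⟨hwf, hminp, hclos, hflat⟩ :=
    pvFold_facts edges (verts.map (fun u => [u])) [] hwf0 hmin0 (by simp) hE0
  rw [← hPF] at hwf hminp hclos hflat
  have hflatv : ∀ u, u ∈ PF.flatten ↔ u ∈ verts := fun u => (hflat u).trans (by rw [hflat0])
  simp only [List.nil_append] at hminp hclos
  have hsame_of_nb : ∀ u w, w ∈ adj.getD u [] → ∃ b ∈ PF, u ∈ b ∧ w ∈ b := by
    intro u w hw
    obtain ⟨e, he, hc⟩ := (hnb_mem u w).mp hw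
    obtain ⟨b, hb, h1, h2⟩ := hclos e he
    rcases hc with ⟨rfl, rfl⟩ | ⟨rfl, rfl⟩
    · exact ⟨b, hb, h1, h2⟩
    · exact ⟨b, hb, h2, h1⟩
  have houter : ∀ (l : List Int) (seen : PySem.Set Int) (c : Int),
      (∀ u ∈ l, u ∈ verts) → (∀ u ∈ seen, u ∈ verts) →
      (∀ b ∈ PF, ∀ x ∈ b, x ∈ seen → ∀ y ∈ b, y ∈ seen) →
      c = ((PF.filter (fun b => b.any (fun u => decide (u ∈ seen)))).length : Int) →
      (∀ u ∈ seen, u ∈ (l.foldl (fun (p : PySem.Set Int × Int) start =>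
          if start ∈ p.1 then p
          else (pvDfsLoop adj (2 * verts.length + 2) [start] (PySem.Set.add p.1 start), p.2 + 1))
          (seen, c)).1) ∧
      (∀ u ∈ l, u ∈ (l.foldl (fun (p : PySem.Set Int × Int) start =>
          if start ∈ p.1 then p
          else (pvDfsLoop adj (2 * verts.length + 2) [start] (PySem.Set.add p.1 start), p.2 + 1))
          (seen, c)).1) ∧
      (l.foldl (fun (p : PySem.Set Int × Int) start =>
          if start ∈ p.1 then p
          else (pvDfsLoop adj (2 * verts.length + 2) [start] (PySem.Set.add p.1 start), p.2 + 1))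
          (seen, c)).2
        = ((PF.filter (fun b => b.any (fun u => decide (u ∈ (l.foldl (fun (p : PySem.Set Int × Int) start =>
            if start ∈ p.1 then p
            else (pvDfsLoop adj (2 * verts.length + 2) [start] (PySem.Set.add p.1 start), p.2 + 1))
            (seen, c)).1)))).length : Int) := by
    intro l
    induction l with
    | nil => intro seen c _ _ _ hc; exact ⟨fun u hu => hu, by simp, hc⟩
    | cons start l ihl =>
      intro seen c hl hseenv hgood hc
      simp only [List.foldl_cons]
      by_cases hs : start ∈ seen
      · rw [if_pos hs]
        obtain ⟨w1, w2, w3⟩ := ihl seen c (fun u hu => hl u (by simp [hu])) hseenv hgood hc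
        exact ⟨w1, fun u hu => by
          rcases List.mem_cons.mp hu with rfl | hu'
          · exact w1 u hs
          · exact w2 u hu', w3⟩
      · rw [if_neg hs]
        have hstartv : start ∈ verts := hl start (by simp)
        obtain ⟨b0, hb0, hstartb0⟩ := List.mem_flatten.mp ((hflatv start).mpr hstartv)
        have hseenclosed : ∀ u ∈ seen, ∀ w ∈ adj.getD u [], w ∈ seen := by
          intro u hu w hw
          obtain ⟨b, hb, hub, hwb⟩ := hsame_of_nb u w hw
          exact hgood b hb u hub hu w hwb
        have hadd : PySem.Set.add seen start = seen ++ [start] := PySem.Set.add_of_not_mem hs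
        have hspec := pvDfs_spec adj verts (fun u => u ∈ seen ∨ u ∈ b0) hnd
          (fun u w hw => ((hflatv w).mp (List.mem_flatten.mpr ⟨_, (hsame_of_nb u w hw).choose_spec.1,
            (hsame_of_nb u w hw).choose_spec.2.2⟩)))
          (fun u w hSu hw => by
            obtain ⟨b, hb, hub, hwb⟩ := hsame_of_nb u w hw
            rcases hSu with h | h
            · exact Or.inl (hgood b hb u hub h w hwb)
            · exact Or.inr (pvBlock_unique PF hwf hb hb0 hub h ▸ hwb))
          (2 * verts.length + 2) [start] (seen ++ [start])
          (by simp) (by simp)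
          (by
            intro u hu hun w hw
            rcases List.mem_append.mp hu with h | h
            · exact List.mem_append.mpr (Or.inl (hseenclosed u h w hw))
            · simp at h; subst h; exact absurd (by simp) hun)
          (by
            intro u hu
            rcases List.mem_append.mp hu with h | h
            · exact Or.inl h
            · simp at h; subst h; exact Or.inr hstartb0)
          (by
            have := List.length_filter_le (fun x => !((seen ++ [start]).contains x)) verts
            simp only [List.length_singleton]
            omega)
        rw [← hadd] at hspec
        obtain ⟨d1, d2, d3⟩ := hspec
        set r1 := pvDfsLoop adj (2 * verts.length + 2) [start] (PySem.Set.add seen start) with hr1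
        have hstartr1 : start ∈ r1 := d1 start (by rw [hadd]; simp)
        have hseenr1 : ∀ u ∈ seen, u ∈ r1 := fun u hu => d1 u (by rw [hadd]; simp [hu])
        have hb0r1 : ∀ y ∈ b0, y ∈ r1 := by
          have hcl : ∀ e ∈ edges, ((e.1 ∈ r1) ↔ (e.2 ∈ r1)) := by
            intro e he
            constructor
            · intro h1
              exact d3 e.1 h1 e.2 ((hnb_mem e.1 e.2).mpr ⟨e, he, Or.inl ⟨rfl, rfl⟩⟩)
            · intro h2
              exact d3 e.2 h2 e.1 ((hnb_mem e.2 e.1).mpr ⟨e, he, Or.inr ⟨rfl, rfl⟩⟩)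
          exact hminp (fun u => u ∈ r1) hcl b0 hb0 start hstartb0 hstartr1
        have hmem1 : ∀ u, u ∈ r1 ↔ (u ∈ seen ∨ u ∈ b0) := by
          intro u
          refine ⟨d2 u, ?_⟩
          rintro (h | h)
          · exact hseenr1 u h
          · exact hb0r1 u h
        have hr1v : ∀ u ∈ r1, u ∈ verts := by
          intro u hu
          rcases (hmem1 u).mp hu with h | h
          · exact hseenv u h
          · exact (hflatv u).mp (List.mem_flatten.mpr ⟨b0, hb0, h⟩)
        have hgood1 : ∀ b ∈ PF, ∀ x ∈ b, x ∈ r1 → ∀ y ∈ b, y ∈ r1 := by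
          intro b hb x hx hxr y hy
          rcases (hmem1 x).mp hxr with h | h
          · exact hseenr1 y (hgood b hb x hx h y hy)
          · exact hb0r1 y (pvBlock_unique PF hwf hb hb0 hx h ▸ hy)
        have hb0notseen : (b0.any (fun u => decide (u ∈ seen))) = false := by
          rw [Bool.eq_false_iff]
          intro hany
          obtain ⟨y, hy, hys⟩ := List.any_eq_true.mp hany
          exact hs (hgood b0 hb0 y hy (by simpa using hys) start hstartb0)
        have hcount1 : c + 1 = ((PF.filter (fun b => b.any (fun u => decide (u ∈ r1)))).length : Int) := by
          have hcongr : PF.filter (fun b => b.any (fun u => decide (u ∈ r1)))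
              = PF.filter (fun b => (b.any (fun u => decide (u ∈ seen))) || b == b0) := by
            apply List.filter_congr
            intro b hb
            rw [Bool.eq_iff_iff]
            simp only [List.any_eq_true, decide_eq_true_eq, Bool.or_eq_true, beq_iff_eq]
            constructor
            · rintro ⟨y, hy, hyr⟩
              rcases (hmem1 y).mp hyr with h | h
              · exact Or.inl ⟨y, hy, h⟩
              · exact Or.inr (pvBlock_unique PF hwf hb hb0 hy h)
            · rintro (⟨y, hy, hys⟩ | rfl)
              · exact ⟨y, hy, hseenr1 y hys⟩
              · exact ⟨start, hstartb0, hstartr1⟩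
          rw [hcongr, pvFilter_or_length PF _ b0 hwf.2.2 hb0 hb0notseen, hc]
          push_cast
          ring
        obtain ⟨w1, w2, w3⟩ := ihl r1 (c + 1) (fun u hu => hl u (by simp [hu])) hr1v hgood1 hcount1
        refine ⟨fun u hu => w1 u (hseenr1 u hu), ?_, w3⟩
        intro u hu
        rcases List.mem_cons.mp hu with rfl | hu'
        · exact w1 u hstartr1
        · exact w2 u hu'
  obtain ⟨-, hcover, hcount⟩ := houter verts PySem.Set.empty 0 (fun u hu => hu) (by simp [PySem.Set.empty])
    (by intro b hb x hx hxs; simp [PySem.Set.empty] at hxs)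
    (by
      have : PF.filter (fun b => b.any (fun u => decide (u ∈ (PySem.Set.empty : PySem.Set Int)))) = [] := by
        simp [PySem.Set.empty]
      rw [this]; simp)
  unfold pvCompsA
  rw [← hadjdef]
  rw [hcount]
  have hfull : PF.filter (fun b => b.any (fun u => decide (u ∈ (verts.foldl (fun (p : PySem.Set Int × Int) start =>
      if start ∈ p.1 then p
      else (pvDfsLoop adj (2 * verts.length + 2) [start] (PySem.Set.add p.1 start), p.2 + 1))
      (PySem.Set.empty, 0)).1))) = PF := by
    apply List.filter_eq_self.mpr
    intro b hb
    obtain ⟨y, hy⟩ := List.exists_mem_of_ne_nil b (hwf.2.1 b hb)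
    have hyv : y ∈ verts := (hflatv y).mp (List.mem_flatten.mpr ⟨b, hb, hy⟩)
    exact List.any_eq_true.mpr ⟨y, hy, by simpa using hcover y hyv⟩
  rw [hfull]
  simp [PySem.List.len_eq]

-- per-vertex equality of A's and B's loop bodies
theorem pvBody_eq (faces : List (Int × Int × Int)) (N : Int)
    (hpre : ∀ f ∈ faces, pvDistinct f) (hb : ∀ f ∈ faces, pvBnd N f)
    (acc : Int × Int) (v : Int) (hv0 : 0 ≤ v) (hvN : v < N) :
    pvBodyA acc v (faces.flatMap (pvContribI v)) = pvBodyB (pvLinks faces N) acc v := by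
  have hedges : (faces.flatMap (pvContribI v)).map
        (fun f => PySem.List.sorted ((pvFaceList f).filter (fun x => !(x == v))) id)
      = (faces.flatMap (pvContribE v)).map (fun e => [e.1, e.2]) := by
    rw [List.map_flatMap, List.map_flatMap]
    exact List.flatMap_congr (fun f hf => pvContrib_edges v f (hpre f hf))
  have hverts : PySem.Set.update PySem.Set.empty
        ((faces.flatMap (pvContribI v)).flatMap (fun f => (pvFaceList f).filter (fun x => !(x == v))))
      = PySem.Set.ofList (faces.flatMap (pvContribV v)) := by
    rw [List.flatMap_assoc]
    have : (faces.flatMap fun f => (pvContribI v f).flatMap (fun f' => (pvFaceList f').filter (fun x => !(x == v))))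
        = faces.flatMap (pvContribV v) :=
      List.flatMap_congr (fun f hf => pvContrib_verts v f (hpre f hf))
    rw [this]
    rfl
  have hPE : (faces.flatMap (pvContribP v)).map (fun p => if p.1 < p.2 then (p.1, p.2) else (p.2, p.1))
      = faces.flatMap (pvContribE v) := by
    rw [List.map_flatMap]
    refine List.flatMap_congr (fun f _ => ?_)
    by_cases e1 : v = f.1 <;> by_cases e2 : v = f.2.1 <;> by_cases e3 : v = f.2.2 <;>
      simp [pvContribP, pvContribE, pvSP, e1, e2, e3] <;> split_ifs <;> simp <;> omega
  have hPV : (faces.flatMap (pvContribP v)).foldl (fun s p => PySem.Set.update s [p.1, p.2])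
        PySem.Set.empty
      = PySem.Set.ofList (faces.flatMap (pvContribV v)) := by
    rw [pvFoldl_update_flatMap (fun p : Int × Int => [p.1, p.2]) (faces.flatMap (pvContribP v)) PySem.Set.empty]
    have : (faces.flatMap (pvContribP v)).flatMap (fun p => [p.1, p.2])
        = faces.flatMap (pvContribV v) := by
      rw [List.flatMap_assoc]
      refine List.flatMap_congr (fun f _ => ?_)
      by_cases e1 : v = f.1 <;> by_cases e2 : v = f.2.1 <;> by_cases e3 : v = f.2.2 <;>
        simp [pvContribP, pvContribV, e1, e2, e3] <;> split_ifs <;> simp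
    rw [this]
    rfl
  have hnd : (PySem.Set.ofList (faces.flatMap (pvContribV v))).Nodup := PySem.Set.nodup_ofList _
  have hE : ∀ e ∈ faces.flatMap (pvContribE v),
      e.1 ∈ PySem.Set.ofList (faces.flatMap (pvContribV v)) ∧
      e.2 ∈ PySem.Set.ofList (faces.flatMap (pvContribV v)) := by
    intro e hee
    obtain ⟨f, hf, hef⟩ := List.mem_flatMap.mp hee
    obtain ⟨h1, h2⟩ := pvContrib_endpoints v f (hpre f hf) e hef
    constructor <;> rw [PySem.Set.mem_ofList] <;> exact List.mem_flatMap.mpr ⟨f, hf, by assumption⟩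
  unfold pvBodyA pvBodyB
  rw [pvLinkA_eq, pvLinks_getD faces N hb v hv0 hvN]
  simp only
  rw [hedges, hverts, hPE, hPV, pvDegCheck_eq _ _ hnd hE, pvComps_eq _ _ hnd hE]

-- ===== VERDICT (by name: the statement is the Claim_ definition above) =====
theorem pinch_stats_py_spec : Claim_equal_pinch_stats_py := by
  intro faces N _ hpre
  unfold Spec_pinch_stats_py
  have hpre' : ∀ f ∈ faces, pvDistinct f := by
    intro f hf
    obtain ⟨h1, h2, h3, _⟩ := hpre f hf
    exact ⟨h1, h2, h3⟩
  have hb : ∀ f ∈ faces, pvBnd N f := by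
    intro f hf
    obtain ⟨_, _, _, h4, h5, h6⟩ := hpre f hf
    exact ⟨h4, h5, h6⟩
  unfold pinch_stats_py pinch_stats_py_alt
  simp only
  rw [pvIncident_items faces N hb, List.foldl_map]
  apply PySem.List.foldl_congr_mem
  intro acc x hx
  obtain ⟨hx0, hxN⟩ := PySem.List.mem_pyRange_one.mp hx
  exact pvBody_eq faces N hpre' hb acc x hx0 hxN
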